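-- pv_equiv track=rewrite | github.com/FrenchKrab/l3-rl-pacman | src/envs/gym-tresor2d/gym_tresor2d/envs/tresor_env.py | generate_zigzag_maze
-- ===== SOURCE A (Python) =====
-- CELLTYPE_WALL = 1
--
-- CELLTYPE_TREASURE = 2
--
-- def generate_zigzag_maze(spawn_position, size):
--     maze = [[0 for x in range(size[1])] for y in range(size[0])]
--     for x in range(int(size[0]/2)):
--         y_offset = 1 if x%2==0 else 0
--         for y in range(size[1]-1):
--             maze[x*2][y+y_offset] = CELLTYPE_WALL
--     goal_position = [size[0]-1, 0 if size[0]/2%2==0 else size[1]-1]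
--     maze[goal_position[0]][goal_position[1]] = CELLTYPE_TREASURE
--     return maze
-- ===== SOURCE B (Python) =====
-- CELLTYPE_WALL = 1
--
-- CELLTYPE_TREASURE = 2
--
-- def generate_zigzag_maze(spawn_position, size):
--     rows, cols = size[0], size[1]
--
--     def column(c):
--         # which wall-segment indices x (wall rows are 2*x) touch column c
--         if cols >= 2 and 1 <= c <= cols - 2:
--             xs = range(rows // 2)            # interior column: every segment
--         elif cols >= 2 and c == 0:
--             xs = range(1, rows // 2, 2)      # left edge: odd segments (offset 0)
--         elif cols >= 2 and c == cols - 1: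
--             xs = range(0, rows // 2, 2)      # right edge: even segments (offset 1)
--         else:
--             xs = range(0)                    # single-column maze: no walls
--         col = [0] * rows
--         for x in xs:
--             col[2 * x] = CELLTYPE_WALL
--         return col
--
--     maze = [list(row) for row in zip(*(column(c) for c in range(cols)))]
--     maze[rows - 1][0 if rows % 4 == 0 else cols - 1] = CELLTYPE_TREASURE
--     return maze
-- ===== Notes on version B (the rewrite author's own statement) =====
-- stated objective: alternative
-- what changed: B constructs the maze column-by-column (each column classified as interior/left-edge/right-edge/degenerate and filled at its own wall rows) and transposes with zip(*...), instead of A's row-major painting of a zero grid; the float test size[0]/2%2==0 becomes the integer test rows%4==0.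
import Mathlib
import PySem

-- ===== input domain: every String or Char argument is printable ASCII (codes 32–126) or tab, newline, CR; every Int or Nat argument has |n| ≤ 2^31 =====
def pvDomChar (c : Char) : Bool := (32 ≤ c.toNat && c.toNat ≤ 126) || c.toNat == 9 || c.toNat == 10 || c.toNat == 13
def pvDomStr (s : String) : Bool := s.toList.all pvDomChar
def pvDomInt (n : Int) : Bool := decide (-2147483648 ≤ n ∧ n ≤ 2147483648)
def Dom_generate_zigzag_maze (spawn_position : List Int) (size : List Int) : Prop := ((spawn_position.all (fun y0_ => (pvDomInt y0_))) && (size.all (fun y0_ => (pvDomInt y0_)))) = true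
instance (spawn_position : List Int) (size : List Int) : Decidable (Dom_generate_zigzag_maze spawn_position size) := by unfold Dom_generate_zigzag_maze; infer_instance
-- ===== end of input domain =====

-- B builds the maze COLUMN by column (each column classified as interior / left edge / right edge /
-- degenerate and filled at its own wall rows) and transposes with zip(*...); equivalence of the RETURN
-- value is proved on Pre_ (A mutates only its own fresh lists, no caller-visible mutation).

-- ===== PORT A =====
-- CELLTYPE_WALL = 1, CELLTYPE_TREASURE = 2 are inlined literals.
-- int(size[0]/2) is truncation toward zero = PySem.Int.truncdiv (exact: |size[0]| ≤ 2^31 < 2^53).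
-- size[0]/2 % 2 == 0 (float arithmetic) holds exactly when size[0] % 4 == 0 (Python %), exact for |size[0]| ≤ 2^31.
def generate_zigzag_maze (spawn_position : List Int) (size : List Int) : List (List Int) :=
  -- maze = [[0 for x in range(size[1])] for y in range(size[0])]
  let maze := (PySem.List.pyRange 0 (PySem.List.pyGetD size 0 0) 1).map
      (fun _y => (PySem.List.pyRange 0 (PySem.List.pyGetD size 1 0) 1).map (fun _x => (0 : Int)))
  -- for x in range(int(size[0]/2)): y_offset…; for y in range(size[1]-1): maze[x*2][y+y_offset] = 1
  let maze := (PySem.List.pyRange 0 (PySem.Int.truncdiv (PySem.List.pyGetD size 0 0) 2) 1).foldl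
      (fun mz x =>
        let y_offset : Int := if PySem.Int.mod x 2 = 0 then 1 else 0
        (PySem.List.pyRange 0 (PySem.List.pyGetD size 1 0 - 1) 1).foldl
          (fun mz2 y =>
            PySem.List.pySetD mz2 (x * 2)
              (PySem.List.pySetD (PySem.List.pyGetD mz2 (x * 2) []) (y + y_offset) 1))
          mz)
      maze
  -- goal_position = [size[0]-1, 0 if size[0]/2%2==0 else size[1]-1]; maze[g0][g1] = 2
  let goal0 := PySem.List.pyGetD size 0 0 - 1
  let goal1 : Int := if PySem.Int.mod (PySem.List.pyGetD size 0 0) 4 = 0 then 0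
                     else PySem.List.pyGetD size 1 0 - 1
  PySem.List.pySetD maze goal0 (PySem.List.pySetD (PySem.List.pyGetD maze goal0 []) goal1 2)

-- ===== PORT B =====
-- column(c) of Source B: pick the wall-segment indices touching column c, then fill a fresh column
def pvColumn (rows cols : Int) (c : Int) : List Int :=
  let xs : List Int :=
    if 2 ≤ cols ∧ 1 ≤ c ∧ c ≤ cols - 2 then PySem.List.pyRange 0 (PySem.Int.floordiv rows 2) 1
    else if 2 ≤ cols ∧ c = 0 then PySem.List.pyRange 1 (PySem.Int.floordiv rows 2) 2
    else if 2 ≤ cols ∧ c = cols - 1 then PySem.List.pyRange 0 (PySem.Int.floordiv rows 2) 2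
    else []
  xs.foldl (fun col x => PySem.List.pySetD col (2 * x) 1) (List.replicate rows.toNat 0)

-- zip(*lists) of Source B: truncating transpose, exact Python zip semantics
def pvZipT : List (List Int) → List (List Int)
  | [] => []
  | l :: ls =>
    if h : (l :: ls).all (fun r => !r.isEmpty) = true then
      (l :: ls).map (fun r => r.headD 0) :: pvZipT ((l :: ls).map (fun r => r.tail))
    else []
termination_by ls => (match ls with | [] => 0 | l :: _ => l.length)
decreasing_by
  simp only [List.map_cons]
  simp only [List.all_cons, Bool.and_eq_true, Bool.not_eq_true'] at h
  cases l with
  | nil => simp at h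
  | cons a t => simp

def generate_zigzag_maze_alt (spawn_position : List Int) (size : List Int) : List (List Int) :=
  let rows := PySem.List.pyGetD size 0 0
  let cols := PySem.List.pyGetD size 1 0
  -- maze = [list(row) for row in zip(*(column(c) for c in range(cols)))]
  let maze := pvZipT ((PySem.List.pyRange 0 cols 1).map (pvColumn rows cols))
  -- maze[rows-1][0 if rows % 4 == 0 else cols-1] = 2
  PySem.List.pySetD maze (rows - 1)
    (PySem.List.pySetD (PySem.List.pyGetD maze (rows - 1) [])
      (if PySem.Int.mod rows 4 = 0 then 0 else cols - 1) 2)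

-- ===== PRECONDITION & SPEC =====
-- A raises IndexError exactly when size has fewer than two entries or size[0] ≤ 0 or size[1] ≤ 0
-- (then maze or its last row is empty and the final assignment fails); Pre_ is exactly where A returns.
def Pre_generate_zigzag_maze (spawn_position : List Int) (size : List Int) : Prop :=
  2 ≤ size.length ∧ 1 ≤ size.getD 0 0 ∧ 1 ≤ size.getD 1 0
instance (spawn_position : List Int) (size : List Int) : Decidable (Pre_generate_zigzag_maze spawn_position size) := by unfold Pre_generate_zigzag_maze; infer_instance
def pvWitness_generate_zigzag_maze : List Int × List Int := ([0, 0], [5, 4])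

def Spec_generate_zigzag_maze (spawn_position : List Int) (size : List Int) (out : List (List Int)) : Prop := out = generate_zigzag_maze_alt spawn_position size
instance (spawn_position : List Int) (size : List Int) (out : List (List Int)) : Decidable (Spec_generate_zigzag_maze spawn_position size out) := by unfold Spec_generate_zigzag_maze; infer_instance

-- ===== CLAIM (what is proved, stated in full; the proofs are below) =====
def Claim_equal_generate_zigzag_maze : Prop := ∀ (spawn_position : List Int) (size : List Int), Dom_generate_zigzag_maze spawn_position size → Pre_generate_zigzag_maze spawn_position size → Spec_generate_zigzag_maze spawn_position size (generate_zigzag_maze spawn_position size)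

-- ===== LEMMAS AND PROOFS =====

-- Nat-world shadow of A's wall-painting loop (proof helpers only).
def pvPaint (k off : Nat) (row : List Int) : List Int :=
  (List.range k).foldl (fun r y => r.set (y + off) 1) row

def pvOff (x : Nat) : Nat := if x % 2 = 0 then 1 else 0

def pvStep (k : Nat) (mz : List (List Int)) (x : Nat) : List (List Int) :=
  mz.set (x * 2) (pvPaint k (pvOff x) (mz.getD (x * 2) []))

-- the wall row, in Nat form
def pvWallRow (n1 off : Nat) : List Int :=
  (List.range n1).map (fun c => if off ≤ c ∧ c < n1 - 1 + off then (1 : Int) else 0)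

theorem pvGetD_set_self {α : Type} (l : List α) (j : Nat) (r d : α) (h : j < l.length) :
    (l.set j r).getD j d = r := by
  simp [List.getD, h]

theorem pvGetD_set_ne {α : Type} (l : List α) (j i : Nat) (r d : α) (h : j ≠ i) :
    (l.set j r).getD i d = l.getD i d := by
  simp [List.getD, h]

theorem pvPaint_succ (k off : Nat) (row : List Int) :
    pvPaint (k + 1) off row = (pvPaint k off row).set (k + off) 1 := by
  simp [pvPaint, List.range_succ]

theorem pvPaint_length (k off : Nat) (row : List Int) :
    (pvPaint k off row).length = row.length := by
  induction k with
  | zero => rfl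
  | succ k ih => simp [pvPaint_succ, ih]

theorem pvPaint_getD (k off : Nat) (row : List Int) (j : Nat) (hj : j < row.length) :
    (pvPaint k off row).getD j 0 =
      if off ≤ j ∧ j < k + off then 1 else row.getD j 0 := by
  induction k with
  | zero =>
    have h : ¬ (off ≤ j ∧ j < 0 + off) := by omega
    simp only [pvPaint, List.range_zero, List.foldl_nil, if_neg h]
  | succ k ih =>
    rw [pvPaint_succ]
    by_cases h : j = k + off
    · subst h
      rw [pvGetD_set_self _ _ _ _ (by rw [pvPaint_length]; exact hj)]
      rw [if_pos (by omega)]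
    · rw [pvGetD_set_ne _ _ _ _ _ (by omega), ih]
      by_cases hc : off ≤ j ∧ j < k + off
      · rw [if_pos hc, if_pos (by omega)]
      · rw [if_neg hc, if_neg (by omega)]

theorem pvWallRow_eq_paint (n1 off : Nat) (h1 : 1 ≤ n1) :
    pvPaint (n1 - 1) off (List.replicate n1 0) = pvWallRow n1 off := by
  apply List.ext_getElem
  · simp [pvPaint_length, pvWallRow]
  · intro i hA hB
    rw [pvPaint_length, List.length_replicate] at hA
    have hgd := pvPaint_getD (n1 - 1) off (List.replicate n1 0) i (by simpa using hA)
    rw [List.getD_eq_getElem _ _ (by rw [pvPaint_length]; simpa using hA)] at hgd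
    rw [hgd]
    simp [pvWallRow, hA]

theorem pvOuter_length (t k : Nat) (mz : List (List Int)) :
    ((List.range t).foldl (pvStep k) mz).length = mz.length := by
  induction t with
  | zero => rfl
  | succ t ih => simp [List.range_succ, pvStep, ih]

theorem pvOuter_getD (t k : Nat) (mz : List (List Int)) (ht : 2 * t ≤ mz.length) (i : Nat) :
    ((List.range t).foldl (pvStep k) mz).getD i [] =
      if i % 2 = 0 ∧ i / 2 < t then pvPaint k (pvOff (i / 2)) (mz.getD i []) else mz.getD i [] := by
  induction t with
  | zero =>
    have h : ¬ (i % 2 = 0 ∧ i / 2 < 0) := by omega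
    simp only [List.range_zero, List.foldl_nil, if_neg h]
  | succ t ih =>
    have ht' : 2 * t ≤ mz.length := by omega
    have hlen : ((List.range t).foldl (pvStep k) mz).length = mz.length := pvOuter_length t k mz
    rw [List.range_succ, List.foldl_append, List.foldl_cons, List.foldl_nil]
    rw [pvStep]
    by_cases h : i = t * 2
    · subst h
      rw [pvGetD_set_self _ _ _ _ (by rw [hlen]; omega)]
      rw [ih ht', if_neg (by omega), if_pos (by omega)]
      have e : t * 2 / 2 = t := by omega
      rw [e]
    · rw [pvGetD_set_ne _ _ _ _ _ (by omega), ih ht']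
      by_cases hc : i % 2 = 0 ∧ i / 2 < t
      · rw [if_pos hc, if_pos (by omega)]
      · rw [if_neg hc, if_neg (by omega)]

-- A's inner loop (set the cell inside the fetched row, write the row back) collapses to one row update
theorem pvInner_eq (k j off : Nat) (mz : List (List Int)) (hj : j < mz.length) :
    (List.range k).foldl (fun mz2 y => mz2.set j (((mz2.getD j []).set (y + off)) 1)) mz
      = mz.set j (pvPaint k off (mz.getD j [])) := by
  induction k with
  | zero =>
    simp only [pvPaint, List.range_zero, List.foldl_nil]
    rw [List.getD_eq_getElem _ _ hj, List.set_getElem_self]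
  | succ k ih =>
    rw [List.range_succ, List.foldl_append, List.foldl_cons, List.foldl_nil, ih]
    rw [pvGetD_set_self _ _ _ _ hj]
    rw [List.set_set, pvPaint_succ]

-- A's outer loop equals the foldl of pvStep
theorem pvAB_outer (t k : Nat) (mz : List (List Int)) (ht : 2 * t ≤ mz.length) :
    (List.range t).foldl
        (fun mz x => (List.range k).foldl
          (fun mz2 m => mz2.set (x * 2) (((mz2.getD (x * 2) []).set (m + pvOff x)) 1)) mz) mz
      = (List.range t).foldl (pvStep k) mz := by
  induction t with
  | zero => rfl
  | succ t ih =>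
    have ht' : 2 * t ≤ mz.length := by omega
    rw [List.range_succ, List.foldl_append, List.foldl_cons, List.foldl_nil]
    rw [ih ht']
    rw [pvInner_eq k (t * 2) (pvOff t) _ (by rw [pvOuter_length]; omega)]
    rw [List.foldl_append, List.foldl_cons, List.foldl_nil, pvStep]

-- main grid equality, Nat world
theorem pvGrid_eq (n0 n1 : Nat) (h0 : 1 ≤ n0) (h1 : 1 ≤ n1) :
    (List.range (n0 / 2)).foldl (pvStep (n1 - 1)) (List.replicate n0 (List.replicate n1 0))
      = (List.range n0).map (fun i =>
          if i % 2 = 0 ∧ i / 2 < n0 / 2 then pvWallRow n1 (pvOff (i / 2)) else List.replicate n1 0) := by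
  apply List.ext_getElem
  · simp [pvOuter_length]
  · intro i hA hB
    rw [pvOuter_length, List.length_replicate] at hA
    have hgd := pvOuter_getD (n0 / 2) (n1 - 1) (List.replicate n0 (List.replicate n1 0)) (by simp; omega) i
    rw [List.getD_eq_getElem _ _ (by rw [pvOuter_length]; simpa using hA)] at hgd
    rw [hgd]
    simp [hA, pvWallRow_eq_paint n1 _ h1]

-- the common normal form of both ports' result
def pvGridN (n0 n1 : Nat) : List (List Int) :=
  (List.range n0).map (fun i =>
    if i % 2 = 0 ∧ i / 2 < n0 / 2 then pvWallRow n1 (pvOff (i / 2)) else List.replicate n1 0)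

def pvFinal (n0 n1 : Nat) : List (List Int) :=
  PySem.List.pySetD (pvGridN n0 n1) ((n0 : Int) - 1)
    (PySem.List.pySetD (PySem.List.pyGetD (pvGridN n0 n1) ((n0 : Int) - 1) [])
      (if PySem.Int.mod (n0 : Int) 4 = 0 then 0 else (n1 : Int) - 1) 2)

theorem pvMod2 (i : Nat) : PySem.Int.mod (i : Int) 2 = ((i % 2 : Nat) : Int) := by
  exact_mod_cast PySem.Int.mod_natCast i 2

theorem pvTdiv (n : Nat) : PySem.Int.truncdiv (n : Int) 2 = ((n / 2 : Nat) : Int) := by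
  unfold PySem.Int.truncdiv
  exact Int.mem_toNat?.mp rfl

theorem pvDiv2 (i : Nat) : PySem.Int.floordiv (i : Int) 2 = ((i / 2 : Nat) : Int) := by
  exact_mod_cast PySem.Int.floordiv_natCast i 2

theorem pvA_norm (sp size : List Int) (n0 n1 : Nat)
    (e0 : size.getD 0 0 = (n0 : Int)) (e1 : size.getD 1 0 = (n1 : Int)) (h0 : 1 ≤ n0) (h1 : 1 ≤ n1) :
    generate_zigzag_maze sp size = pvFinal n0 n1 := by
  unfold generate_zigzag_maze pvFinal
  simp only [PySem.List.pyGetD_zero, PySem.List.pyGetD_ofNat', e0, e1]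
  simp only [PySem.List.pyRange_one, List.foldl_map, List.map_map, sub_zero, Int.toNat_natCast, zero_add]
  have etd : (PySem.Int.truncdiv ((n0 : Nat) : Int) 2).toNat = n0 / 2 := by
    rw [pvTdiv]; exact Int.toNat_natCast _
  have en1' : (((n1 : Nat) : Int) - 1).toNat = n1 - 1 := by omega
  have emul : ∀ y : Nat, ((y : Int)) * 2 = (((y * 2 : Nat)) : Int) := by
    intro y; push_cast; ring
  have eoff : ∀ y : Nat, (if PySem.Int.mod ((y : Nat) : Int) 2 = 0 then (1 : Int) else 0)
      = ((pvOff y : Nat) : Int) := by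
    intro y
    rw [pvMod2]
    unfold pvOff
    by_cases h : y % 2 = 0
    · rw [if_pos (by exact_mod_cast h), if_pos h]; simp
    · rw [if_neg (by exact_mod_cast h), if_neg h]; simp
  simp only [etd, en1', eoff, emul, PySem.List.pySetD_natCast, PySem.List.pyGetD_natCast,
    ← Nat.cast_add, Function.comp, List.map_const', List.length_range]
  rw [pvAB_outer (n0 / 2) (n1 - 1) _ (by simp; omega)]
  simp only [Function.comp_def, List.map_const', List.length_range]
  rw [pvGrid_eq n0 n1 h0 h1]
  rfl

-- ---------- B side ----------

-- a foldl of single-cell sets, read back at index r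
theorem pvFoldlSet_getD (xs : List Int) (l : List Int) (r : Nat)
    (hx : ∀ x ∈ xs, 0 ≤ x ∧ (2 * x).toNat < l.length) :
    (xs.foldl (fun col x => PySem.List.pySetD col (2 * x) 1) l).getD r 0
      = if ∃ x ∈ xs, 2 * x = (r : Int) then 1 else l.getD r 0 := by
  induction xs generalizing l with
  | nil => simp
  | cons x xs ih =>
    have hx0 : 0 ≤ x := (hx x (by simp)).1
    have hlt : (2 * x).toNat < l.length := (hx x (by simp)).2
    rw [List.foldl_cons, PySem.List.pySetD_of_nonneg l 1 (by omega)]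
    rw [ih _ (by intro y hy; simpa [List.length_set] using hx y (by simp [hy]))]
    by_cases hmem : ∃ y ∈ xs, 2 * y = (r : Int)
    · rw [if_pos hmem, if_pos (by obtain ⟨y, hy, hye⟩ := hmem; exact ⟨y, by simp [hy], hye⟩)]
    · rw [if_neg hmem]
      by_cases he : 2 * x = (r : Int)
      · have : (2 * x).toNat = r := by omega
        rw [this, pvGetD_set_self _ _ _ _ (by omega), if_pos ⟨x, by simp, he⟩]
      · rw [pvGetD_set_ne _ _ _ _ _ (by omega)]
        have hno : ¬ ∃ y ∈ x :: xs, 2 * y = (r : Int) := by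
          rintro ⟨y, hy, hye⟩
          simp only [List.mem_cons] at hy
          rcases hy with h | h
          · exact he (h ▸ hye)
          · exact hmem ⟨y, h, hye⟩
        rw [if_neg hno]

theorem pvFoldlSet_length (xs : List Int) (l : List Int) :
    (xs.foldl (fun col x => PySem.List.pySetD col (2 * x) 1) l).length = l.length := by
  induction xs generalizing l with
  | nil => rfl
  | cons x xs ih => rw [List.foldl_cons, ih, PySem.List.length_pySetD]

theorem pvColumn_length (n0 n1 : Nat) (c : Int) :
    (pvColumn (n0 : Int) (n1 : Int) c).length = n0 := by
  unfold pvColumn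
  rw [pvFoldlSet_length]
  simp

-- the entries of column c: wall exactly at the rows of the segments that touch column c
theorem pvColumn_getD (n0 n1 c r : Nat) (h1 : 1 ≤ n1) (hc : c < n1) (hr : r < n0) :
    (pvColumn (n0 : Int) (n1 : Int) (c : Int)).getD r 0
      = if r % 2 = 0 ∧ r / 2 < n0 / 2 ∧ pvOff (r / 2) ≤ c ∧ c < n1 - 1 + pvOff (r / 2)
        then 1 else 0 := by
  unfold pvColumn
  rw [pvDiv2]
  have hbase : (List.replicate ((n0 : Int)).toNat (0 : Int)).getD r 0 = 0 := by
    simp [List.getD_replicate]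
  have hlen : (List.replicate ((n0 : Int)).toNat (0 : Int)).length = n0 := by simp
  -- three possible ranges, all with elements 0 ≤ x < n0/2 hence 2x < n0
  by_cases hint : 2 ≤ (n1 : Int) ∧ 1 ≤ (c : Int) ∧ (c : Int) ≤ (n1 : Int) - 2
  · rw [if_pos hint, pvFoldlSet_getD]
    · rw [hbase]
      by_cases hm : ∃ x ∈ PySem.List.pyRange 0 ((n0 / 2 : Nat) : Int) 1, 2 * x = (r : Int)
      · rw [if_pos hm]
        obtain ⟨x, hx, he⟩ := hm
        rw [PySem.List.mem_pyRange_one] at hx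
        rw [if_pos (by constructor; omega; constructor; omega;
                       unfold pvOff; split <;> omega)]
      · rw [if_neg hm, if_neg]
        rintro ⟨hre, hrlt, -, -⟩
        exact hm ⟨((r / 2 : Nat) : Int), by rw [PySem.List.mem_pyRange_one]; omega, by omega⟩
    · intro x hx
      rw [PySem.List.mem_pyRange_one] at hx
      constructor
      · omega
      · rw [hlen]; omega
  · rw [if_neg hint]
    by_cases hleft : 2 ≤ (n1 : Int) ∧ (c : Int) = 0
    · rw [if_pos hleft, pvFoldlSet_getD]
      · rw [hbase]
        by_cases hm : ∃ x ∈ PySem.List.pyRange 1 ((n0 / 2 : Nat) : Int) 2, 2 * x = (r : Int)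
        · rw [if_pos hm]
          obtain ⟨x, hx, he⟩ := hm
          rw [PySem.List.mem_pyRange_iff_of_pos (by norm_num)] at hx
          obtain ⟨hx1, hx2, k, hk⟩ := hx
          rw [if_pos]
          refine ⟨by omega, by omega, ?_, ?_⟩ <;>
            (have hrodd : (r / 2) % 2 = 1 := by omega
             unfold pvOff; rw [if_neg (by omega)]; omega)
        · rw [if_neg hm, if_neg]
          rintro ⟨hre, hrlt, hof1, hof2⟩
          have hc0 : c = 0 := by omega
          have hodd : (r / 2) % 2 = 1 := by
            by_contra hcon
            have : pvOff (r / 2) = 1 := by unfold pvOff; rw [if_pos (by omega)]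
            omega
          exact hm ⟨((r / 2 : Nat) : Int),
            by rw [PySem.List.mem_pyRange_iff_of_pos (by norm_num)]
               refine ⟨by omega, by omega, ⟨((r / 2 - 1) / 2 : Nat), by push_cast; omega⟩⟩,
            by omega⟩
      · intro x hx
        rw [PySem.List.mem_pyRange_iff_of_pos (by norm_num)] at hx
        constructor
        · omega
        · rw [hlen]; omega
    · rw [if_neg hleft]
      by_cases hright : 2 ≤ (n1 : Int) ∧ (c : Int) = (n1 : Int) - 1
      · rw [if_pos hright, pvFoldlSet_getD]
        · rw [hbase]
          by_cases hm : ∃ x ∈ PySem.List.pyRange 0 ((n0 / 2 : Nat) : Int) 2, 2 * x = (r : Int)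
          · rw [if_pos hm]
            obtain ⟨x, hx, he⟩ := hm
            rw [PySem.List.mem_pyRange_iff_of_pos (by norm_num)] at hx
            obtain ⟨hx1, hx2, k, hk⟩ := hx
            have heven : (r / 2) % 2 = 0 := by omega
            have : pvOff (r / 2) = 1 := by unfold pvOff; rw [if_pos heven]
            rw [if_pos (by omega)]
          · rw [if_neg hm, if_neg]
            rintro ⟨hre, hrlt, hof1, hof2⟩
            have heven : (r / 2) % 2 = 0 := by
              by_contra hcon
              have : pvOff (r / 2) = 0 := by unfold pvOff; rw [if_neg (by omega)]
              omega
            exact hm ⟨((r / 2 : Nat) : Int),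
              by rw [PySem.List.mem_pyRange_iff_of_pos (by norm_num)]
                 refine ⟨by omega, by omega, ⟨((r / 2 / 2 : Nat)), by push_cast; omega⟩⟩,
              by omega⟩
        · intro x hx
          rw [PySem.List.mem_pyRange_iff_of_pos (by norm_num)] at hx
          constructor
          · omega
          · rw [hlen]; omega
      · -- degenerate: n1 = 1 (c = 0); no walls anywhere
        rw [if_neg hright]
        simp only [List.foldl_nil]
        rw [hbase, if_neg]
        rintro ⟨-, -, hof1, hof2⟩
        have hn1 : n1 = 1 := by omega
        unfold pvOff at hof1 hof2
        split at hof1 <;> split at hof2 <;> omega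

-- zip(*cols): equal-length columns give the row-indexed transpose
theorem pvZipT_eq (n : Nat) (ls : List (List Int)) (hne : ls ≠ [])
    (hlen : ∀ l ∈ ls, l.length = n) :
    pvZipT ls = (List.range n).map (fun r => ls.map (fun l => l.getD r 0)) := by
  induction n generalizing ls with
  | zero =>
    cases ls with
    | nil => exact absurd rfl hne
    | cons l t =>
      have : l = [] := List.eq_nil_of_length_eq_zero (hlen l (by simp))
      unfold pvZipT
      rw [dif_neg (by simp [this])]
      simp
  | succ n ih =>
    cases ls with
    | nil => exact absurd rfl hne
    | cons l t =>
      have hall : (l :: t).all (fun r => !r.isEmpty) = true := by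
        rw [List.all_eq_true]
        intro a ha
        have := hlen a ha
        simp [List.isEmpty_iff]
        intro hnil
        rw [hnil] at this
        simp at this
      unfold pvZipT
      rw [dif_pos hall]
      rw [ih ((l :: t).map (fun r => r.tail)) (by simp)
            (by intro a ha
                rw [List.mem_map] at ha
                obtain ⟨b, hb, hba⟩ := ha
                have := hlen b hb
                rw [← hba]
                simp [this])]
      conv_rhs => rw [List.range_succ_eq_map, List.map_cons, List.map_map]
      congr 1
      · apply List.map_congr_left
        intro a _
        cases a with
        | nil => simp [List.getD]
        | cons x xs => simp [List.getD]
      · apply List.map_congr_left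
        intro r _
        simp only [Function.comp_apply]
        rw [List.map_map]
        apply List.map_congr_left
        intro a _
        cases a with
        | nil => simp [List.getD]
        | cons x xs => simp [List.getD]

theorem pvB_norm (sp size : List Int) (n0 n1 : Nat)
    (e0 : size.getD 0 0 = (n0 : Int)) (e1 : size.getD 1 0 = (n1 : Int)) (h0 : 1 ≤ n0) (h1 : 1 ≤ n1) :
    generate_zigzag_maze_alt sp size = pvFinal n0 n1 := by
  unfold generate_zigzag_maze_alt pvFinal
  simp only [PySem.List.pyGetD_zero, PySem.List.pyGetD_ofNat', e0, e1]
  have hmaze : pvZipT ((PySem.List.pyRange 0 ((n1 : Nat) : Int) 1).map (pvColumn (n0 : Int) (n1 : Int)))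
      = pvGridN n0 n1 := by
    rw [PySem.List.pyRange_one]
    simp only [List.map_map, sub_zero, Int.toNat_natCast]
    have hform : (List.range n1).map ((pvColumn (n0 : Int) (n1 : Int)) ∘ (fun k : Nat => 0 + (k : Int)))
        = (List.range n1).map (fun c : Nat => pvColumn (n0 : Int) (n1 : Int) (c : Int)) := by
      apply List.map_congr_left; intro c _; simp
    rw [hform]
    rw [pvZipT_eq n0 _ (by simp; omega)
          (by intro a ha
              rw [List.mem_map] at ha
              obtain ⟨c, -, hca⟩ := ha
              rw [← hca]; exact pvColumn_length n0 n1 _)]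
    unfold pvGridN
    apply List.map_congr_left
    intro r hr
    rw [List.mem_range] at hr
    rw [List.map_map]
    by_cases hcond : r % 2 = 0 ∧ r / 2 < n0 / 2
    · rw [if_pos hcond]
      unfold pvWallRow
      apply List.map_congr_left
      intro c hcm
      rw [List.mem_range] at hcm
      simp only [Function.comp_apply]
      rw [pvColumn_getD n0 n1 c r h1 hcm hr]
      by_cases hin : pvOff (r / 2) ≤ c ∧ c < n1 - 1 + pvOff (r / 2)
      · rw [if_pos ⟨hcond.1, hcond.2, hin.1, hin.2⟩, if_pos hin]
      · rw [if_neg (by rintro ⟨-, -, a, b⟩; exact hin ⟨a, b⟩), if_neg hin]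
    · rw [if_neg hcond]
      have : (List.range n1).map ((fun l => l.getD r 0) ∘ fun c : Nat => pvColumn (n0 : Int) (n1 : Int) (c : Int))
          = (List.range n1).map (fun _ => (0 : Int)) := by
        apply List.map_congr_left
        intro c hcm
        rw [List.mem_range] at hcm
        simp only [Function.comp_apply]
        rw [pvColumn_getD n0 n1 c r h1 hcm hr]
        rw [if_neg (by rintro ⟨a, b, -, -⟩; exact hcond ⟨a, b⟩)]
      rw [this]
      simp [List.map_const']
  rw [hmaze]

-- ===== VERDICT (by name: the statement is the Claim_ definition above) =====
theorem generate_zigzag_maze_spec : Claim_equal_generate_zigzag_maze := by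
  intro sp size _hdom hpre
  obtain ⟨hlen, h0, h1⟩ := hpre
  have e0 : size.getD 0 0 = ((size.getD 0 0).toNat : Int) := (Int.toNat_of_nonneg (by omega)).symm
  have e1 : size.getD 1 0 = ((size.getD 1 0).toNat : Int) := (Int.toNat_of_nonneg (by omega)).symm
  unfold Spec_generate_zigzag_maze
  rw [pvA_norm sp size _ _ e0 e1 (by omega) (by omega),
      pvB_norm sp size _ _ e0 e1 (by omega) (by omega)]
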